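-- pv_equiv track=rewrite | github.com/yuntongzhang/vulnfix | src/snapshot.py | remove_invalid_snapshots
-- ===== SOURCE A (Python) =====
-- def remove_invalid_snapshots(pass_ss, fail_ss):
--     """
--     As a last sheild: remove invalid snapshots to prevent them
--     from poluting other snapshots in preceeding steps
--     """
--     all_ss = pass_ss + fail_ss
--     to_remove = []
--     for ss in all_ss:
--         if not ss:
--             to_remove.append(ss)
--     for empty_ss in to_remove:
--         if empty_ss in pass_ss:
--             pass_ss.remove(empty_ss)
--         if empty_ss in fail_ss:
--             fail_ss.remove(empty_ss)
--     return pass_ss, fail_ss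
-- ===== SOURCE B (Python) =====
-- def remove_invalid_snapshots(pass_ss, fail_ss):
--     """
--     As a last sheild: remove invalid snapshots to prevent them
--     from poluting other snapshots in preceeding steps
--     """
--     pass_ss[:] = [ss for ss in pass_ss if ss]
--     fail_ss[:] = [ss for ss in fail_ss if ss]
--     return pass_ss, fail_ss
-- ===== Notes on version B (the rewrite author's own statement) =====
-- stated objective: simpler
-- what changed: Replaces the two-phase collect-then-remove loop (with its 'in'-membership tests and list.remove calls) by a single filtering pass over each list, written back via slice assignment to preserve the in-place mutation.
import Mathlib
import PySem

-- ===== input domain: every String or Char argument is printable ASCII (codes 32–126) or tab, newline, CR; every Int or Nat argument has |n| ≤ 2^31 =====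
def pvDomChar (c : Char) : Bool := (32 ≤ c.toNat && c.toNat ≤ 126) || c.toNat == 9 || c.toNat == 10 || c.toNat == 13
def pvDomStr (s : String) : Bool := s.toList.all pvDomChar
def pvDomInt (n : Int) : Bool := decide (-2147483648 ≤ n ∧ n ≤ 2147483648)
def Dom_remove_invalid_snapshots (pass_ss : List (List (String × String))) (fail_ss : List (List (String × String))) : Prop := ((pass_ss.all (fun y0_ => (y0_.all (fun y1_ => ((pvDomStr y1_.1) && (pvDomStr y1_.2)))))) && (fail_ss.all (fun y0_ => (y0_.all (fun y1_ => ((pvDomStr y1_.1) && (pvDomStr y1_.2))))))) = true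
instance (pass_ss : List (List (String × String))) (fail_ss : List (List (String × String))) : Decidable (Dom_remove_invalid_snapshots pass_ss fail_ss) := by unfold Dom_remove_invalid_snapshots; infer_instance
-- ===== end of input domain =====

-- B replaces A's two-phase collect-then-remove loops by a single filtering pass per list (simpler).
-- Both Pythons mutate their arguments in place identically (all empty snapshots removed);
-- the theorems here are about the returned value.

-- ===== PORT A =====
def remove_invalid_snapshots (pass_ss : List (List (String × String))) (fail_ss : List (List (String × String))) : (List (List (String × String))) × (List (List (String × String))) :=
  let all_ss := pass_ss ++ fail_ss
  let to_remove := all_ss.foldl (fun acc ss => if ss.isEmpty then acc ++ [ss] else acc) []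
  to_remove.foldl
    (fun pf empty_ss =>
      let p := if empty_ss ∈ pf.1 then (PySem.List.remove? pf.1 empty_ss).getD pf.1 else pf.1
      let f := if empty_ss ∈ pf.2 then (PySem.List.remove? pf.2 empty_ss).getD pf.2 else pf.2
      (p, f))
    (pass_ss, fail_ss)

-- ===== PORT B =====
def remove_invalid_snapshots_alt (pass_ss : List (List (String × String))) (fail_ss : List (List (String × String))) : (List (List (String × String))) × (List (List (String × String))) :=
  (pass_ss.filter (fun ss => !ss.isEmpty), fail_ss.filter (fun ss => !ss.isEmpty))

-- ===== PRECONDITION & SPEC =====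
def Spec_remove_invalid_snapshots (pass_ss : List (List (String × String))) (fail_ss : List (List (String × String))) (out : (List (List (String × String))) × (List (List (String × String)))) : Prop := out = remove_invalid_snapshots_alt pass_ss fail_ss
instance (pass_ss : List (List (String × String))) (fail_ss : List (List (String × String))) (out : (List (List (String × String))) × (List (List (String × String)))) : Decidable (Spec_remove_invalid_snapshots pass_ss fail_ss out) := by unfold Spec_remove_invalid_snapshots; infer_instance

-- ===== CLAIM (what is proved, stated in full; the proofs are below) =====
def Claim_equal_remove_invalid_snapshots : Prop := ∀ (pass_ss : List (List (String × String))) (fail_ss : List (List (String × String))), Dom_remove_invalid_snapshots pass_ss fail_ss → Spec_remove_invalid_snapshots pass_ss fail_ss (remove_invalid_snapshots pass_ss fail_ss)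

-- ===== LEMMAS AND PROOFS =====

-- A's per-element removal step on one list (what each iteration of A's second loop does to one list,
-- since every element of `to_remove` is the empty snapshot).
def stepA (xs : List (List (String × String))) : List (List (String × String)) :=
  if ([] : List (String × String)) ∈ xs then xs.erase [] else xs

theorem stepA_of_not_mem {xs : List (List (String × String))} (h : ([] : List (String × String)) ∉ xs) : stepA xs = xs := by
  simp [stepA, h]

theorem erase_nil_filter (xs : List (List (String × String))) :
    (xs.erase []).filter (fun ss => !ss.isEmpty) = xs.filter (fun ss => !ss.isEmpty) := by
  induction xs with
  | nil => rfl
  | cons x xs ih =>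
    by_cases hx : x = ([] : List (String × String))
    · subst hx; simp
    · rw [List.erase_cons_tail (by simpa using hx)]
      simp only [List.filter_cons, ih]

theorem filter_eq_self_of_not_mem {xs : List (List (String × String))} (h : ([] : List (String × String)) ∉ xs) :
    xs.filter (fun ss => !ss.isEmpty) = xs := by
  rw [List.filter_eq_self]
  intro a ha
  rcases a with _ | ⟨x, a⟩
  · exact absurd ha h
  · simp

theorem stepA_iter (n : Nat) (xs : List (List (String × String))) (h : xs.count [] ≤ n) :
    stepA^[n] xs = xs.filter (fun ss => !ss.isEmpty) := by
  induction n generalizing xs with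
  | zero =>
    have hnm : ([] : List (String × String)) ∉ xs := by
      have := List.count_eq_zero.mp (Nat.le_zero.mp h)
      exact this
    simpa [Function.iterate_zero] using (filter_eq_self_of_not_mem hnm).symm
  | succ n ih =>
    rw [Function.iterate_succ_apply]
    by_cases hm : ([] : List (String × String)) ∈ xs
    · have hstep : stepA xs = xs.erase [] := by simp [stepA, hm]
      rw [hstep, ih _ ?_, erase_nil_filter]
      have hc : 1 ≤ xs.count ([] : List (String × String)) := List.one_le_count_iff.mpr hm
      have := List.count_erase_self (a := ([] : List (String × String))) (l := xs)
      omega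
    · rw [stepA_of_not_mem hm, ih _ ?_]
      have := List.count_eq_zero.mpr hm
      omega

-- A's second loop, when every element of the removal list is [], applies stepA to each component
-- once per element.
theorem foldA_eq_iter (l : List (List (String × String))) (hl : ∀ e ∈ l, e = ([] : List (String × String)))
    (p f : List (List (String × String))) :
    l.foldl (fun pf empty_ss =>
      let p := if empty_ss ∈ pf.1 then (PySem.List.remove? pf.1 empty_ss).getD pf.1 else pf.1
      let f := if empty_ss ∈ pf.2 then (PySem.List.remove? pf.2 empty_ss).getD pf.2 else pf.2
      ((p, f) : _ × _)) (p, f) = (stepA^[l.length] p, stepA^[l.length] f) := by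
  induction l generalizing p f with
  | nil => rfl
  | cons e l ih =>
    have he : e = ([] : List (String × String)) := hl e (by simp)
    subst he
    have hbody : ∀ xs : List (List (String × String)),
        (if ([] : List (String × String)) ∈ xs then (PySem.List.remove? xs []).getD xs else xs) = stepA xs := by
      intro xs
      by_cases hm : ([] : List (String × String)) ∈ xs
      · simp [stepA, hm, PySem.List.remove?_eq_some_erase xs [] hm]
      · simp [stepA, hm]
    simp only [List.foldl_cons, List.length_cons]
    rw [ih (fun e he => hl e (by simp [he]))]
    simp only [hbody]
    rw [Function.iterate_succ_apply, Function.iterate_succ_apply]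

theorem count_le_countP (xs : List (List (String × String))) :
    xs.count ([] : List (String × String)) = xs.countP (fun ss => ss.isEmpty) := by
  unfold List.count
  apply List.countP_congr
  intro a _
  rcases a with _ | ⟨x, a⟩ <;> simp

-- ===== VERDICT (by name: the statement is the Claim_ definition above) =====
theorem remove_invalid_snapshots_spec : Claim_equal_remove_invalid_snapshots := by
  intro pass_ss fail_ss _
  unfold Spec_remove_invalid_snapshots remove_invalid_snapshots remove_invalid_snapshots_alt
  have hto := PySem.List.foldl_append_if_eq_filter
      (l := pass_ss ++ fail_ss) (p := fun ss => ss.isEmpty)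
      (acc := ([] : List (List (String × String))))
  rw [List.nil_append] at hto
  dsimp only
  rw [hto]
  rw [foldA_eq_iter _ (by intro e he; simpa [List.isEmpty_iff] using (List.mem_filter.mp he).2)]
  have hlen : ((pass_ss ++ fail_ss).filter (fun ss => ss.isEmpty)).length =
      pass_ss.countP (fun ss => ss.isEmpty) + fail_ss.countP (fun ss => ss.isEmpty) := by
    rw [← List.countP_eq_length_filter, List.countP_append]
  rw [hlen]
  rw [stepA_iter _ _ (by rw [count_le_countP]; omega),
      stepA_iter _ _ (by rw [count_le_countP]; omega)]
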